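-- pv_equiv track=rewrite | github.com/SharynHu/leetcodepy | leet0668_BinarySearch_2021-03-24.py | count
-- ===== SOURCE A (Python) =====
-- def count(m, n, candidate):
--     '''
--     count how many numbers that are less than or equal to candidate
--     '''
--     count = 0
--     j = n
--     for i in range(1, m+1):
--         while(j>=1 and i*j>candidate):
--             j -= 1
--         count += j
--     return count
-- ===== SOURCE B (Python) =====
-- def count(m, n, candidate):
--     '''
--     count how many numbers that are less than or equal to candidate
--     '''
--     return sum(min(n, max(0, candidate // i)) for i in range(1, m + 1))
-- ===== Notes on version B (the rewrite author's own statement) =====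
-- stated objective: simpler
-- what changed: Replaces A's stateful two-pointer sweep (a j carried and decremented across rows) with a one-line sum of the independent per-row closed form min(n, max(0, candidate // i)).
import Mathlib
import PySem

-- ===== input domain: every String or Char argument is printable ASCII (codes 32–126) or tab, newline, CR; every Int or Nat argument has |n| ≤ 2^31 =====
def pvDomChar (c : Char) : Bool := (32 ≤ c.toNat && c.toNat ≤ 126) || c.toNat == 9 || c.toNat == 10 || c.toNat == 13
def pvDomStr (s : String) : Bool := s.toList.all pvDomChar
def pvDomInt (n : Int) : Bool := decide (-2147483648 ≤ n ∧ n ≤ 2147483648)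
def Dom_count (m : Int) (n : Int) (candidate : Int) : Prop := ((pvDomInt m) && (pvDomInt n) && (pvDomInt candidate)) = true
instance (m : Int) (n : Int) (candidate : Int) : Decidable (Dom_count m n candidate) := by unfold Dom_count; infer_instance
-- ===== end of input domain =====

-- B replaces A's stateful two-pointer sweep by an independent per-row closed form
-- min n (max 0 (candidate // i)) summed over rows (return value only; no side effects involved).

-- ===== PORT A =====
-- inner 'while j>=1 and i*j>candidate: j -= 1' loop of A
def countWhileJ (i candidate j : Int) : Int :=
  if h : 1 ≤ j ∧ candidate < i * j then countWhileJ i candidate (j - 1) else j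
termination_by j.toNat
decreasing_by omega

def count (m : Int) (n : Int) (candidate : Int) : Int :=
  -- state (count, j); 'for i in range(1, m+1)'
  ((PySem.List.pyRange 1 (m + 1) 1).foldl
    (fun (s : Int × Int) i =>
      let j := countWhileJ i candidate s.2
      (s.1 + j, j))
    (0, n)).1

-- ===== PORT B =====
def count_alt (m : Int) (n : Int) (candidate : Int) : Int :=
  ((PySem.List.pyRange 1 (m + 1) 1).map
    (fun i => min n (max 0 (PySem.Int.floordiv candidate i)))).sum

-- ===== PRECONDITION & SPEC =====
def Spec_count (m : Int) (n : Int) (candidate : Int) (out : Int) : Prop := out = count_alt m n candidate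
instance (m : Int) (n : Int) (candidate : Int) (out : Int) : Decidable (Spec_count m n candidate out) := by unfold Spec_count; infer_instance

-- ===== CLAIM (what is proved, stated in full; the proofs are below) =====
def Claim_equal_count : Prop := ∀ (m : Int) (n : Int) (candidate : Int), Dom_count m n candidate → Spec_count m n candidate (count m n candidate)

-- ===== LEMMAS AND PROOFS =====

-- the per-row closed form B computes
def rowF (candidate i : Int) : Int := max 0 (PySem.Int.floordiv candidate i)

-- A's inner while loop computes the clamp min j (rowF candidate i)
lemma countWhileJ_eq (i candidate : Int) (hi : 0 < i) :
    ∀ (k : Nat) (j : Int), j.toNat = k →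
      countWhileJ i candidate j = min j (rowF candidate i) := by
  intro k
  induction k with
  | zero =>
    intro j hj
    rw [countWhileJ]
    split
    · omega
    · rename_i h
      rcases not_and_or.mp h with h1 | h2
      · have : j ≤ 0 := by omega
        have : 0 ≤ rowF candidate i := le_max_left _ _
        omega
      · have hle : j ≤ PySem.Int.floordiv candidate i :=
          (PySem.Int.le_floordiv_iff_mul_le hi).mpr (by nlinarith [not_lt.mp h2])
        have : PySem.Int.floordiv candidate i ≤ rowF candidate i := le_max_right _ _
        omega
  | succ k ih =>
    intro j hj
    rw [countWhileJ]
    split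
    · rename_i h
      rw [ih (j - 1) (by omega)]
      have hlt : PySem.Int.floordiv candidate i < j :=
        (PySem.Int.floordiv_lt_iff_lt_mul hi).mpr (by nlinarith [h.2])
      have h0 : (0 : Int) < j := by omega
      unfold rowF; omega
    · rename_i h
      rcases not_and_or.mp h with h1 | h2
      · have : j ≤ 0 := by omega
        have : 0 ≤ rowF candidate i := le_max_left _ _
        omega
      · have hle : j ≤ PySem.Int.floordiv candidate i :=
          (PySem.Int.le_floordiv_iff_mul_le hi).mpr (by nlinarith [not_lt.mp h2])
        have : PySem.Int.floordiv candidate i ≤ rowF candidate i := le_max_right _ _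
        omega

-- rowF is antitone in the row index (on positive rows)
lemma rowF_antitone (candidate i i' : Int) (hi : 0 < i) (hii' : i ≤ i') :
    rowF candidate i' ≤ rowF candidate i := by
  unfold rowF
  rcases le_or_gt (PySem.Int.floordiv candidate i') 0 with h | h
  · have : 0 ≤ max 0 (PySem.Int.floordiv candidate i) := le_max_left _ _
    omega
  · have hq : PySem.Int.floordiv candidate i' * i' ≤ candidate :=
      (PySem.Int.le_floordiv_iff_mul_le (by omega)).mp le_rfl
    have : PySem.Int.floordiv candidate i' ≤ PySem.Int.floordiv candidate i := by
      refine (PySem.Int.le_floordiv_iff_mul_le hi).mpr ?_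
      nlinarith
    omega

-- loop invariant: as long as j agrees with n under min against all remaining rowF values,
-- the fold over the remaining range adds exactly B's per-row sums
lemma count_fold_eq (candidate b : Int) :
    ∀ (k : Nat) (a : Int), (b - a).toNat = k → 1 ≤ a →
      ∀ (n s j : Int),
        (∀ i, a ≤ i → min j (rowF candidate i) = min n (rowF candidate i)) →
        ((PySem.List.pyRange a b 1).foldl
          (fun (st : Int × Int) i =>
            let j := countWhileJ i candidate st.2
            (st.1 + j, j))
          (s, j)).1
        = s + ((PySem.List.pyRange a b 1).map
            (fun i => min n (max 0 (PySem.Int.floordiv candidate i)))).sum := by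
  intro k
  induction k with
  | zero =>
    intro a hk ha n s j hinv
    rw [PySem.List.pyRange_one_eq_nil (by omega)]
    simp
  | succ k ih =>
    intro a hk ha n s j hinv
    rw [PySem.List.pyRange_one_cons (by omega)]
    simp only [List.foldl_cons, List.map_cons, List.sum_cons]
    rw [countWhileJ_eq a candidate (by omega) j.toNat j rfl, hinv a le_rfl]
    have hrec := ih (a + 1) (by omega) (by omega) n
      (s + min n (rowF candidate a)) (min n (rowF candidate a))
      (by
        intro i hi
        have hF : rowF candidate i ≤ rowF candidate a :=
          rowF_antitone candidate a i (by omega) (by omega)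
        omega)
    rw [hrec]
    unfold rowF
    ring

theorem count_spec : Claim_equal_count := by
  intro m n candidate _
  unfold Spec_count count count_alt
  rw [count_fold_eq candidate (m + 1) (m + 1 - 1).toNat 1 rfl (by omega) n 0 n
    (fun i _ => rfl)]
  ring
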